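-- pv_equiv track=rewrite | github.com/webszilla/work-zilla | apps/backend/worksuite/ai_chatbot/api_views.py | _limit_entries_by_words
-- ===== SOURCE A (Python) =====
-- def _limit_entries_by_words(title, entries, max_words=1800):
--     words_used = 0
--     limited = []
--     for tag, text in entries:
--         if not text:
--             continue
--         words = text.split()
--         if not words:
--             continue
--         if words_used >= max_words:
--             break
--         remaining = max_words - words_used
--         if len(words) > remaining:
--             text = " ".join(words[:remaining])
--             limited.append((tag, text))
--             words_used += remaining
--             break
--         limited.append((tag, text))
--         words_used += len(words)
--     return title, limited
-- ===== SOURCE B (Python) =====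
-- def _limit_entries_by_words(title, entries, max_words=1800):
--     rows = [(tag, text.split(), text) for tag, text in entries if text.split()]
--     prefix = [0]
--     acc = 0
--     for _tag, words, _text in rows:
--         acc += len(words)
--         prefix.append(acc)
--     cut = next((i for i in range(len(rows)) if prefix[i + 1] > max_words), len(rows))
--     limited = [(tag, text) for tag, _words, text in rows[:cut]]
--     if cut < len(rows) and max_words > prefix[cut]:
--         tag, words, _text = rows[cut]
--         limited.append((tag, " ".join(words[:max_words - prefix[cut]])))
--     return title, limited
-- ===== Notes on version B (the rewrite author's own statement) =====
-- stated objective: alternative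
-- what changed: A's single stateful loop with a running words_used budget and mid-loop breaks is replaced by a filter-comprehension producing (tag, words, text) rows, an explicit prefix-sum list, a cutoff index computed as the first prefix sum exceeding max_words, a slice for the fully-kept entries and a single boundary truncation.
import Mathlib
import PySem

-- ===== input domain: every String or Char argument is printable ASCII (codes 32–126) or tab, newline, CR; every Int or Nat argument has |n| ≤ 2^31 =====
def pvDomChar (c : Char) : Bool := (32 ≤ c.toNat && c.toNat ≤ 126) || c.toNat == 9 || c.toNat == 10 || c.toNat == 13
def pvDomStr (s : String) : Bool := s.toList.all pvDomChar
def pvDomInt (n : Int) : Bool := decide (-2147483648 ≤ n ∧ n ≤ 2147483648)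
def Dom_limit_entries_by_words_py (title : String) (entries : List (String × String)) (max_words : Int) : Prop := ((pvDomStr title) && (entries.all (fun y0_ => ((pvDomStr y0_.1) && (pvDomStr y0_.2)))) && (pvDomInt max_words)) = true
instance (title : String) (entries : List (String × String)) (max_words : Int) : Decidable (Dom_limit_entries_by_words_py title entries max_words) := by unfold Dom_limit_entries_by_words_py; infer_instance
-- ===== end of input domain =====

-- B replaces A's single stateful budget loop by a filter + prefix-sum / cutoff-index decomposition (same cost, different structure).

-- ===== PORT A =====
-- A's for-loop with its mutable state (words_used, limited), transcribed as structural recursion.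
def pvALoop (max_words : Int) : List (String × String) → Int → List (String × String) → List (String × String)
  | [], _, limited => limited
  | (tag, text) :: rest, words_used, limited =>
    if text = "" then pvALoop max_words rest words_used limited            -- if not text: continue
    else
      let words := PySem.Str.split₀ text                                   -- words = text.split()
      if words = [] then pvALoop max_words rest words_used limited         -- if not words: continue
      else if words_used ≥ max_words then limited                          -- break
      else
        let remaining := max_words - words_used
        if (words.length : Int) > remaining then                           -- truncate and break
          limited ++ [(tag, PySem.Str.join " " (PySem.List.slice words none (some remaining)))]
        else pvALoop max_words rest (words_used + (words.length : Int)) (limited ++ [(tag, text)])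

def limit_entries_by_words_py (title : String) (entries : List (String × String)) (max_words : Int) : String × (List (String × String)) :=
  (title, pvALoop max_words entries 0 [])

-- ===== PORT B =====
-- rows = [(tag, text.split(), text) for tag, text in entries if text.split()]
def pvBRows (entries : List (String × String)) : List (String × List String × String) :=
  (entries.filter (fun p => !(PySem.Str.split₀ p.2).isEmpty)).map (fun p => (p.1, PySem.Str.split₀ p.2, p.2))

-- the body of Source B after the comprehension: prefix sums (acc, prefix), cutoff index, slice, boundary remainder.
-- prefix[i] reads are total via pyGetD; every Python read is in range (0 ≤ i+1 ≤ len(rows) = len(prefix)-1), so this is exact.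
def pvBBody (rows : List (String × List String × String)) (max_words : Int) : List (String × String) :=
  let ap := rows.foldl (fun (s : Int × List Int) r =>
      (s.1 + (r.2.1.length : Int), s.2 ++ [s.1 + (r.2.1.length : Int)])) ((0 : Int), [(0 : Int)])
  let pre := ap.2
  let cut : Nat := ((List.range rows.length).find?
      (fun (i : Nat) => decide (PySem.List.pyGetD pre ((i : Int) + 1) 0 > max_words))).getD rows.length
  let limited := (PySem.List.slice rows none (some (cut : Int))).map (fun r => (r.1, r.2.2))
  if cut < rows.length ∧ max_words > PySem.List.pyGetD pre (cut : Int) 0 then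
    match PySem.List.pyGet? rows (cut : Int) with      -- rows[cut]; in range since cut < len(rows)
    | some (tag, words, _) =>
        limited ++ [(tag, PySem.Str.join " "
          (PySem.List.slice words none (some (max_words - PySem.List.pyGetD pre (cut : Int) 0))))]
    | none => limited
  else limited

def limit_entries_by_words_py_alt (title : String) (entries : List (String × String)) (max_words : Int) : String × (List (String × String)) :=
  (title, pvBBody (pvBRows entries) max_words)

-- ===== PRECONDITION & SPEC =====
def Spec_limit_entries_by_words_py (title : String) (entries : List (String × String)) (max_words : Int) (out : String × (List (String × String))) : Prop := out = limit_entries_by_words_py_alt title entries max_words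
instance (title : String) (entries : List (String × String)) (max_words : Int) (out : String × (List (String × String))) : Decidable (Spec_limit_entries_by_words_py title entries max_words out) := by unfold Spec_limit_entries_by_words_py; infer_instance

-- ===== CLAIM (what is proved, stated in full; the proofs are below) =====
def Claim_equal_limit_entries_by_words_py : Prop := ∀ (title : String) (entries : List (String × String)) (max_words : Int), Dom_limit_entries_by_words_py title entries max_words → Spec_limit_entries_by_words_py title entries max_words (limit_entries_by_words_py title entries max_words)

-- ===== LEMMAS AND PROOFS =====

-- common reference recursion: the list both sides compute, over the filtered rows and the remaining budget
def pvG : List (String × List String × String) → Int → List (String × String)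
  | [], _ => []
  | (tag, w, t) :: rest, m =>
    if (w.length : Int) ≤ m then (tag, t) :: pvG rest (m - (w.length : Int))
    else if 0 < m then [(tag, PySem.Str.join " " (PySem.List.slice w none (some m)))] else []

lemma pvBRows_cons_nil (tag text : String) (rest : List (String × String))
    (h : PySem.Str.split₀ text = []) : pvBRows ((tag, text) :: rest) = pvBRows rest := by
  simp [pvBRows, h]

lemma pvBRows_cons (tag text : String) (rest : List (String × String))
    (h : PySem.Str.split₀ text ≠ []) :
    pvBRows ((tag, text) :: rest) = (tag, PySem.Str.split₀ text, text) :: pvBRows rest := by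
  simp [pvBRows, h]

-- A's loop equals the reference recursion
lemma pvALoop_eq (max_words : Int) :
    ∀ (entries : List (String × String)) (u : Int) (limited : List (String × String)),
      pvALoop max_words entries u limited = limited ++ pvG (pvBRows entries) (max_words - u) := by
  intro entries
  induction entries with
  | nil => intro u limited; simp [pvALoop, pvBRows, pvG]
  | cons e rest ih =>
    obtain ⟨tag, text⟩ := e
    intro u limited
    by_cases ht : text = ""
    · subst ht
      have hs : PySem.Str.split₀ "" = [] := by decide
      simp [pvALoop, pvBRows_cons_nil _ _ _ hs, ih]
    · by_cases hw : PySem.Str.split₀ text = []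
      · simp [pvALoop, ht, hw, pvBRows_cons_nil _ _ _ hw, ih]
      · rw [pvBRows_cons _ _ _ hw]
        have hlen : 1 ≤ ((PySem.Str.split₀ text).length : Int) := by
          have := List.length_pos_iff.mpr hw
          omega
        by_cases hu : u ≥ max_words
        · have h1 : ¬ ((PySem.Str.split₀ text).length : Int) ≤ max_words - u := by omega
          have h2 : ¬ (0 < max_words - u) := by omega
          simp [pvALoop, ht, hw, hu, pvG, h1]
        · by_cases hbig : ((PySem.Str.split₀ text).length : Int) > max_words - u
          · have h1 : ¬ ((PySem.Str.split₀ text).length : Int) ≤ max_words - u := by omega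
            simp [pvALoop, ht, hw, hu, pvG, h1, hbig, not_le.mp hu]
          · have h1 : ((PySem.Str.split₀ text).length : Int) ≤ max_words - u := by omega
            rw [pvG]
            simp only [pvALoop, ht, hw, hu, if_false]
            simp only [if_neg hbig, if_pos h1, ih]
            have : max_words - (u + ((PySem.Str.split₀ text).length : Int))
                 = max_words - u - ((PySem.Str.split₀ text).length : Int) := by ring
            simp [this]

-- the prefix list that B's foldl builds
def pvPreList : List (String × List String × String) → Int → List Int
  | [], _ => []
  | r :: rs, a => (a + (r.2.1.length : Int)) :: pvPreList rs (a + (r.2.1.length : Int))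

lemma pvFoldl_pre (rows : List (String × List String × String)) :
    ∀ (a : Int) (p : List Int),
      rows.foldl (fun (s : Int × List Int) r =>
        (s.1 + (r.2.1.length : Int), s.2 ++ [s.1 + (r.2.1.length : Int)])) (a, p)
      = ((pvPreList rows a).getLastD a, p ++ pvPreList rows a) := by
  induction rows with
  | nil => intro a p; simp [pvPreList]
  | cons r rs ih =>
    intro a p
    simp only [List.foldl_cons, pvPreList, ih, List.getLastD_cons]
    simp

lemma pvPreList_shift (rows : List (String × List String × String)) :
    ∀ (c b : Int), pvPreList rows (c + b) = (pvPreList rows b).map (c + ·) := by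
  induction rows with
  | nil => intro c b; simp [pvPreList]
  | cons r rs ih =>
    intro c b
    simp only [pvPreList, List.map_cons]
    have hcb : c + b + (r.2.1.length : Int) = c + (b + (r.2.1.length : Int)) := by ring
    rw [hcb, ih]

-- B's cutoff and body, re-expressed over an explicit prefix list (pure List operations)
def pvCut (pre : List Int) (n : Nat) (m : Int) : Nat :=
  ((List.range n).find? (fun i => decide (pre.getD (i + 1) 0 > m))).getD n

def pvCore (rows : List (String × List String × String)) (pre : List Int) (m : Int) :
    List (String × String) :=
  let cut := pvCut pre rows.length m
  let limited := (rows.take cut).map (fun r => (r.1, r.2.2))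
  if cut < rows.length ∧ m > pre.getD cut 0 then
    match rows[cut]? with
    | some (tag, words, _) =>
        limited ++ [(tag, PySem.Str.join " "
          (PySem.List.slice words none (some (m - pre.getD cut 0))))]
    | none => limited
  else limited

lemma pvBBody_eq_core (rows : List (String × List String × String)) (m : Int) :
    pvBBody rows m = pvCore rows ((0 : Int) :: pvPreList rows 0) m := by
  unfold pvBBody pvCore pvCut
  rw [pvFoldl_pre rows 0 [(0 : Int)]]
  simp only [show ((0 : Int) :: []) ++ pvPreList rows 0 = (0 : Int) :: pvPreList rows 0 from by simp,
    show ∀ i : Nat, ((i : Int) + 1) = (((i + 1 : Nat)) : Int) from by intro i; push_cast; ring,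
    PySem.List.pyGetD_natCast, PySem.List.pyGet?_natCast, PySem.List.slice_to_natCast]

lemma pvFind?_congr {α : Type} (l : List α) (p q : α → Bool)
    (h : ∀ a ∈ l, p a = q a) : l.find? p = l.find? q := by
  induction l with
  | nil => rfl
  | cons x xs ih =>
    rw [List.find?_cons, List.find?_cons, h x (by simp)]
    cases q x <;> simp [ih (fun a ha => h a (by simp [ha]))]

lemma pvGetD_map_add (c : Int) (l : List Int) (k : Nat) (hk : k < l.length) :
    (l.map (c + ·)).getD k 0 = c + l.getD k 0 := by
  simp [List.getD_eq_getElem?_getD, List.getElem?_eq_getElem hk,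
    List.getElem?_eq_getElem (show k < (l.map (c + ·)).length by simpa using hk)]

lemma pvPreList_length (rows : List (String × List String × String)) :
    ∀ a : Int, (pvPreList rows a).length = rows.length := by
  induction rows with
  | nil => intro a; simp [pvPreList]
  | cons r rs ih => intro a; simp [pvPreList, ih]

lemma pvCut_le (pre : List Int) (n : Nat) (m : Int) : pvCut pre n m ≤ n := by
  unfold pvCut
  cases h : (List.range n).find? (fun i => decide (pre.getD (i + 1) 0 > m)) with
  | none => simp
  | some j =>
    have := List.mem_range.mp (List.mem_of_find?_eq_some h)
    simp only [Option.getD_some]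
    omega

lemma pvCut_cons_gt (pre : List Int) (n : Nat) (m c : Int) (hc : pre.getD 1 0 = c)
    (hgt : c > m) : pvCut pre (n + 1) m = 0 := by
  unfold pvCut
  rw [List.range_succ_eq_map, List.find?_cons]
  have h0 : (decide (pre.getD (0 + 1) 0 > m)) = true := by
    simp only [Nat.zero_add, hc]; exact decide_eq_true hgt
  rw [h0]
  rfl

lemma pvCut_cons_le (q : List Int) (n : Nat) (m c : Int) (hle : c ≤ m)
    (hlen : n ≤ q.length) :
    pvCut ((0 : Int) :: ((0 : Int) :: q).map (c + ·)) (n + 1) m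
      = pvCut ((0 : Int) :: q) n (m - c) + 1 := by
  unfold pvCut
  rw [List.range_succ_eq_map, List.find?_cons]
  have h0 : (decide ((((0 : Int) :: ((0 : Int) :: q).map (c + ·)).getD (0 + 1) 0) > m)) = false := by
    simp only [Nat.zero_add, List.map_cons, List.getD_cons_succ, List.getD_cons_zero]
    simp only [add_zero]
    exact decide_eq_false (by omega)
  rw [h0]
  rw [List.find?_map]
  simp only [Function.comp_def]
  have hcong : (List.range n).find?
      (fun i => decide ((((0 : Int) :: ((0 : Int) :: q).map (c + ·)).getD (Nat.succ i + 1) 0) > m))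
      = (List.range n).find? (fun i => decide (((0 : Int) :: q).getD (i + 1) 0 > m - c)) := by
    apply pvFind?_congr
    intro i hi
    have hi' : i < n := List.mem_range.mp hi
    have h1 : (((0 : Int) :: ((0 : Int) :: q).map (c + ·)).getD (Nat.succ i + 1) 0)
        = c + ((0 : Int) :: q).getD (i + 1) 0 := by
      rw [show Nat.succ i + 1 = (i + 1) + 1 from rfl, List.getD_cons_succ]
      exact pvGetD_map_add c ((0 : Int) :: q) (i + 1) (by simp; omega)
    rw [h1]
    exact decide_eq_decide.mpr (by omega)
  rw [hcong]
  cases hres : (List.range n).find? (fun i => decide (((0 : Int) :: q).getD (i + 1) 0 > m - c)) with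
  | none => simp
  | some j => simp

lemma pvCore_nil (pre : List Int) (m : Int) : pvCore [] pre m = [] := by
  simp [pvCore, pvCut]

-- B's body equals the reference recursion
lemma pvCore_eq (rows : List (String × List String × String)) :
    ∀ (m : Int), pvCore rows ((0 : Int) :: pvPreList rows 0) m = pvG rows m := by
  induction rows with
  | nil => intro m; simp [pvCore_nil, pvG]
  | cons r rs ih =>
    intro m
    obtain ⟨tag, w, t⟩ := r
    set c : Int := ((w.length : Nat) : Int) with hc
    have hpre : (0 : Int) :: pvPreList ((tag, w, t) :: rs) 0
        = (0 : Int) :: (((0 : Int) :: pvPreList rs 0).map (c + ·)) := by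
      simp only [pvPreList, List.map_cons, add_zero, zero_add]
      rw [show pvPreList rs c = pvPreList rs (c + 0) from by rw [add_zero],
        pvPreList_shift]
    by_cases hgt : c > m
    · -- first row already exceeds the budget: cut = 0
      have hcut : pvCut ((0 : Int) :: pvPreList ((tag, w, t) :: rs) 0)
          (((tag, w, t) :: rs).length) m = 0 := by
        rw [hpre, List.length_cons]
        exact pvCut_cons_gt _ _ m c (by simp) hgt
      rw [pvCore]
      simp only [hcut]
      have hgt' : ¬ ((w.length : Int) ≤ m) := by omega
      by_cases hm : 0 < m
      · simp [pvG, hm, hgt', sub_zero]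
      · simp [pvG, hm, hgt']
    · -- first row fits entirely: cut = cutR + 1
      have hle : c ≤ m := by omega
      have hq : rs.length ≤ (pvPreList rs 0).length := by rw [pvPreList_length]
      set preR : List Int := (0 : Int) :: pvPreList rs 0 with hpreR
      set cutR : Nat := pvCut preR rs.length (m - c) with hcutR
      have hcutR_le : cutR ≤ rs.length := pvCut_le _ _ _
      have hcut : pvCut ((0 : Int) :: pvPreList ((tag, w, t) :: rs) 0)
          (((tag, w, t) :: rs).length) m = cutR + 1 := by
        rw [hpre, List.length_cons]
        exact pvCut_cons_le _ _ m c hle hq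
      have hgd : ((0 : Int) :: pvPreList ((tag, w, t) :: rs) 0).getD (cutR + 1) 0
          = c + preR.getD cutR 0 := by
        rw [hpre, List.getD_cons_succ]
        exact pvGetD_map_add c preR cutR (by simp [hpreR, pvPreList_length]; omega)
      rw [pvCore]
      simp only [hcut, hgd]
      rw [pvG]
      rw [if_pos (show ((w.length : Nat) : Int) ≤ m from hle)]
      rw [← ih (m - c), pvCore]
      simp only [← hcutR]
      have hcond : (cutR + 1 < ((tag, w, t) :: rs).length ∧ m > c + preR.getD cutR 0)
          ↔ (cutR < rs.length ∧ m - c > preR.getD cutR 0) := by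
        simp only [List.length_cons]
        constructor <;> (intro h; exact ⟨by omega, by omega⟩)
      by_cases hcnd : cutR < rs.length ∧ m - c > preR.getD cutR 0
      · rw [if_pos (hcond.mpr hcnd), if_pos hcnd]
        simp only [List.getElem?_cons_succ]
        cases hx : rs[cutR]? with
        | none => simp [List.take_succ_cons]
        | some rr =>
          obtain ⟨tg, ws, tx⟩ := rr
          simp only [List.take_succ_cons, List.map_cons]
          rw [show m - (c + preR.getD cutR 0) = m - c - preR.getD cutR 0 from by ring]
          simp
      · rw [if_neg (fun h => hcnd (hcond.mp h)), if_neg hcnd]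
        simp [List.take_succ_cons]

lemma pvBBody_eq (rows : List (String × List String × String)) (max_words : Int) :
    pvBBody rows max_words = pvG rows max_words := by
  rw [pvBBody_eq_core, pvCore_eq]

-- ===== VERDICT (by name: the statement is the Claim_ definition above) =====
theorem limit_entries_by_words_py_spec : Claim_equal_limit_entries_by_words_py := by
  intro title entries max_words _
  unfold Spec_limit_entries_by_words_py
  unfold limit_entries_by_words_py limit_entries_by_words_py_alt
  rw [pvALoop_eq, pvBBody_eq]
  simp
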